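-- pv_equiv track=rewrite | github.com/Chakri3434/My_Codes | Basic programs/Arrays/majority-element.py | f
-- ===== SOURCE A (Python) =====
-- def f(l):
--     n=len(l)//2
--     d={}
--     for i in range(len(l)):
--         if l[i] in d:
--             d[l[i]]+=1
--             if d[l[i]]>n:
--                 return(i)
--         else:
--             d[l[i]]=1
--     return -1
-- ===== SOURCE B (Python) =====
-- def f(l):
--     n = len(l) // 2
--     counts = {}
--     for x in l:
--         counts[x] = counts.get(x, 0) + 1
--     m = None
--     for k, c in counts.items():
--         if c > n:
--             m = k
--             break
--     if m is None:
--         return -1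
--     cnt = 0
--     for i in range(len(l)):
--         if l[i] == m:
--             cnt += 1
--             if cnt > n:
--                 return i
--     return -1
-- ===== Notes on version B (the rewrite author's own statement) =====
-- stated objective: alternative
-- what changed: A is a single early-exit scan growing a dict of running counts; B first builds the full counter and extracts the majority candidate m, then does a targeted second pass tracking only m's running count and returns the first index where it exceeds len//2.
-- intended difference: On single-element lists A returns -1 even though the one element occurs 1 > 0 = len//2 times (A can only return on a repeated element); B returns 0, the index where the element becomes the majority, which is the intended value. — e.g. on f([5]): A returns -1, B returns 0
import Mathlib
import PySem

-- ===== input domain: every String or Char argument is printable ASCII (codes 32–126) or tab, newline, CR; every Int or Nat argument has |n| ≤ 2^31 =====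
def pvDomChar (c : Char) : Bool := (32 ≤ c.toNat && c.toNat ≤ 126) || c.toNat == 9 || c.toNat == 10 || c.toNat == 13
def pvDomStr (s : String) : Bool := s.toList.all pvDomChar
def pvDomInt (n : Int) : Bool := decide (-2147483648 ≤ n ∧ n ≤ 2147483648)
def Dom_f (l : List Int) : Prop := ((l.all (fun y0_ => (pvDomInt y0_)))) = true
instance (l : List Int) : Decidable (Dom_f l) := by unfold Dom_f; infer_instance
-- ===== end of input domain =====

-- B replaces A's single dict-growing early-exit scan by counter-first + majority candidate + a
-- targeted second pass; on single-element lists B returns the intended index 0 where A returns -1.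

-- ===== PORT A =====
-- A's loop: running-count dict d; on a repeated element bump its count and return i when it exceeds n.
def f_go (n : Int) : List (Int × Int) → PySem.Dict Int Int → Int
  | [], _ => -1
  | (i, x) :: rest, d =>
    if PySem.Dict.contains d x then
      let d' := PySem.Dict.insert d x (PySem.Dict.getD d x 0 + 1)
      if PySem.Dict.getD d' x 0 > n then i else f_go n rest d'
    else f_go n rest (PySem.Dict.insert d x 1)

def f (l : List Int) : Int :=
  let n := PySem.Int.floordiv (l.length : Int) 2
  f_go n (PySem.List.enumerate l 0) PySem.Dict.empty

-- ===== PORT B =====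
-- counts[x] = counts.get(x, 0) + 1 over the whole list
def f_countLoop (l : List Int) : PySem.Dict Int Int :=
  l.foldl (fun d x => PySem.Dict.insert d x (PySem.Dict.getD d x 0 + 1)) PySem.Dict.empty

-- first key of the counter whose total count exceeds n (None if no majority element)
def f_findMaj (n : Int) : List (Int × Int) → Option Int
  | [] => none
  | (k, c) :: rest => if c > n then some k else f_findMaj n rest

-- second pass: running count of m only
def f_scan (n m : Int) : List (Int × Int) → Int → Int
  | [], _ => -1
  | (i, x) :: rest, cnt =>
    if x = m then
      if cnt + 1 > n then i else f_scan n m rest (cnt + 1)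
    else f_scan n m rest cnt

def f_alt (l : List Int) : Int :=
  let n := PySem.Int.floordiv (l.length : Int) 2
  match f_findMaj n (f_countLoop l).items with
  | none => -1
  | some m => f_scan n m (PySem.List.enumerate l 0) 0

-- ===== PRECONDITION & SPEC =====
-- On single-element lists A returns -1 even though the one element occurs 1 > 0 = len//2 times
-- (A can only return on a repeated element); B returns 0, the intended majority index.
def D_f (l : List Int) : Prop := l.length = 1
instance (l : List Int) : Decidable (D_f l) := by unfold D_f; infer_instance

def Spec_f (l : List Int) (out : Int) : Prop := ¬ D_f l → out = f_alt l
instance (l : List Int) (out : Int) : Decidable (Spec_f l out) := by unfold Spec_f; infer_instance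

def pvDiffWitness_f : List Int := [5]
def pvDiffWitnessOut_f : Int × Int := (-1, 0)

-- ===== CLAIM (what is proved, stated in full; the proofs are below) =====
def Claim_unchanged_f : Prop := ∀ (l : List Int), Dom_f l → Spec_f l (f l)
def Claim_changed_f : Prop := Dom_f (pvDiffWitness_f) ∧ D_f (pvDiffWitness_f) ∧ f (pvDiffWitness_f) = pvDiffWitnessOut_f.1 ∧ f_alt (pvDiffWitness_f) = pvDiffWitnessOut_f.2 ∧ pvDiffWitnessOut_f.1 ≠ pvDiffWitnessOut_f.2
def Claim_exact_f : Prop := ∀ (l : List Int), Dom_f l → D_f l → f l ≠ f_alt l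

-- ===== LEMMAS AND PROOFS =====

-- reference: first index i with count of l[i] in l[0..i] both > n and ≥ 2, as a prefix recursion
def specGo (n : Int) (p s : List Int) : Int :=
  match s with
  | [] => -1
  | x :: s' =>
    if (p.count x : Int) + 1 > n ∧ 1 ≤ p.count x then (p.length : Int)
    else specGo n (p ++ [x]) s'

lemma count_add_count_le (x y : Int) (l : List Int) (h : x ≠ y) :
    l.count x + l.count y ≤ l.length := by
  induction l with
  | nil => simp
  | cons a t ih => simp [List.count_cons]; split_ifs with h1 h2 <;> simp_all <;> omega

lemma fgo_eq_spec (n : Int) : ∀ (s p : List Int),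
    f_go n (PySem.List.enumerate s (p.length : Int)) (PySem.Dict.counter p) = specGo n p s := by
  intro s
  induction s with
  | nil => intro p; simp [PySem.List.enumerate, f_go, specGo]
  | cons x s ih =>
    intro p
    rw [PySem.List.enumerate_cons, f_go, PySem.Dict.contains_counter]
    have hcnt : PySem.Dict.counter (p ++ [x])
        = PySem.Dict.insert (PySem.Dict.counter p) x (PySem.Dict.getD (PySem.Dict.counter p) x 0 + 1) :=
      PySem.Dict.counter_append_singleton p x
    have hlen : ((p ++ [x]).length : Int) = (p.length : Int) + 1 := by simp
    by_cases hx : x ∈ p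
    · simp only [List.contains_eq_mem, hx, decide_true, if_true]
      rw [← hcnt, PySem.Dict.getD_counter]
      have hc : ((p ++ [x]).count x : Int) = (p.count x : Int) + 1 := by
        simp [List.count_append]
      rw [hc, specGo]
      have h1 : 1 ≤ p.count x := List.count_pos_iff.mpr hx
      by_cases hgt : (p.count x : Int) + 1 > n
      · simp [hgt, h1]
      · simp only [hgt, h1, and_true, if_false]
        rw [← hlen, ih (p ++ [x])]
    · simp only [List.contains_eq_mem, hx, decide_false, Bool.false_eq_true, if_false]
      have h0 : PySem.Dict.insert (PySem.Dict.counter p) x 1 = PySem.Dict.counter (p ++ [x]) := by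
        rw [hcnt, PySem.Dict.getD_counter]
        have : (List.count x p : Int) = 0 := by
          simp [List.count_eq_zero_of_not_mem hx]
        norm_num [this]
      rw [h0, specGo]
      have h1 : ¬ (1 ≤ p.count x) := by
        simp [List.count_eq_zero_of_not_mem hx]
      simp only [h1, and_false, if_false]
      rw [← hlen, ih (p ++ [x])]

lemma spec_neg (n : Int) : ∀ (s p : List Int),
    (∀ x : Int, ((p ++ s).count x : Int) ≤ n) → specGo n p s = -1 := by
  intro s
  induction s with
  | nil => intro p _; rfl
  | cons x s ih =>
    intro p h
    have hx := h x
    have hle : (p.count x : Int) + 1 ≤ ((p ++ x :: s).count x : Int) := by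
      have : p.count x + 1 ≤ (p ++ x :: s).count x := by
        simp [List.count_append]
      exact_mod_cast this
    rw [specGo]
    have hcond : ¬ ((p.count x : Int) + 1 > n ∧ 1 ≤ p.count x) := by
      intro ⟨h1, _⟩; omega
    rw [if_neg hcond]
    apply ih
    intro y
    have := h y
    rwa [List.append_cons] at this

lemma fscan_eq_spec (n m : Int) (l : List Int) (hm : (l.count m : Int) > n)
    (hn : (l.length : Int) ≤ 2 * n + 1) (h1n : 1 ≤ n) :
    ∀ (s p : List Int), p ++ s = l →
      f_scan n m (PySem.List.enumerate s (p.length : Int)) (p.count m : Int) = specGo n p s := by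
  intro s
  induction s with
  | nil => intro p _; simp [PySem.List.enumerate, f_scan, specGo]
  | cons x s ih =>
    intro p hl
    rw [PySem.List.enumerate_cons, f_scan, specGo]
    have hlen : ((p ++ [x]).length : Int) = (p.length : Int) + 1 := by simp
    by_cases hxm : x = m
    · subst hxm
      rw [if_pos rfl]
      have hnn : (0:Int) ≤ (p.count x : Int) := by exact_mod_cast Nat.zero_le _
      have h2 : ((p.count x : Int) + 1 > n)
          ↔ ((p.count x : Int) + 1 > n ∧ 1 ≤ p.count x) := by
        constructor
        · intro ha
          refine ⟨ha, ?_⟩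
          have : (1:Int) ≤ (p.count x : Int) := by omega
          exact_mod_cast this
        · rintro ⟨ha, _⟩; exact ha
      by_cases hc : (p.count x : Int) + 1 > n ∧ 1 ≤ p.count x
      · rw [if_pos (h2.mpr hc), if_pos hc]
      · rw [if_neg (fun h => hc (h2.mp h)), if_neg hc]
        have hcnt : ((p ++ [x]).count x : Int) = (p.count x : Int) + 1 := by
          simp [List.count_append]
        rw [← hcnt, ← hlen]
        exact ih (p ++ [x]) (by rw [← hl]; simp)
    · rw [if_neg hxm]
      have hcond : ¬ ((p.count x : Int) + 1 > n ∧ 1 ≤ p.count x) := by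
        intro ⟨h1, _⟩
        have hcx : p.count x + 1 ≤ l.count x := by
          rw [← hl]; simp [List.count_append]
        have hsum := count_add_count_le x m l hxm
        have hml : (l.count x : Int) + (l.count m : Int) ≤ (l.length : Int) := by
          exact_mod_cast hsum
        have : (p.count x : Int) + 1 ≤ (l.count x : Int) := by exact_mod_cast hcx
        omega
      rw [if_neg hcond]
      have hcnt : ((p ++ [x]).count m : Int) = (p.count m : Int) := by
        simp [List.count_append, hxm]
      rw [← hcnt, ← hlen]
      exact ih (p ++ [x]) (by rw [← hl]; simp)

lemma findMaj_none (n : Int) : ∀ ps : List (Int × Int),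
    f_findMaj n ps = none → ∀ q ∈ ps, q.2 ≤ n := by
  intro ps
  induction ps with
  | nil => simp
  | cons q rest ih =>
    intro h r hr
    rw [f_findMaj] at h
    by_cases hq : q.2 > n
    · rw [if_pos hq] at h; exact absurd h (by simp)
    · rw [if_neg hq] at h
      rcases List.mem_cons.mp hr with h1 | h1
      · subst h1; omega
      · exact ih h r h1

lemma findMaj_some (n : Int) : ∀ (ps : List (Int × Int)) (m : Int),
    f_findMaj n ps = some m → ∃ c, (m, c) ∈ ps ∧ c > n := by
  intro ps
  induction ps with
  | nil => simp [f_findMaj]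
  | cons q rest ih =>
    intro m h
    rw [f_findMaj] at h
    by_cases hq : q.2 > n
    · rw [if_pos hq] at h
      exact ⟨q.2, by simp [← Option.some_inj.mp h], hq⟩
    · rw [if_neg hq] at h
      obtain ⟨c, hc1, hc2⟩ := ih m h
      exact ⟨c, List.mem_cons_of_mem _ hc1, hc2⟩

-- ===== VERDICT (by name: the statements are the Claim_ definitions above) =====
theorem f_spec : Claim_unchanged_f := by
  intro l _
  unfold Spec_f
  intro hD
  have hfd : PySem.Int.floordiv (l.length : Int) 2 = ((l.length / 2 : Nat) : Int) := by
    exact_mod_cast PySem.Int.floordiv_natCast l.length 2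
  set n : Int := ((l.length / 2 : Nat) : Int) with hn
  have hA : f l = specGo n [] l := by
    show f_go (PySem.Int.floordiv (l.length : Int) 2) (PySem.List.enumerate l 0) PySem.Dict.empty
        = specGo n [] l
    rw [hfd]
    have := fgo_eq_spec n l []
    simpa using this
  rw [hA]
  have hcount : f_countLoop l = PySem.Dict.counter l :=
    PySem.Dict.foldl_insert_getD_add_one_eq_counter l
  show specGo n [] l
      = match f_findMaj (PySem.Int.floordiv (l.length : Int) 2) (f_countLoop l).items with
        | none => -1
        | some m => f_scan (PySem.Int.floordiv (l.length : Int) 2) m (PySem.List.enumerate l 0) 0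
  rw [hfd, hcount]
  rcases hfm : f_findMaj n (PySem.Dict.counter l).items with _ | m
  · -- no majority element: both return -1
    have hall : ∀ x : Int, ((l.count x : Int)) ≤ n := by
      intro x
      by_cases hx : x ∈ l
      · have : (x, (l.count x : Int)) ∈ (PySem.Dict.counter l).items := by
          rw [PySem.Dict.items_counter]
          exact List.mem_map.mpr ⟨x, (PySem.Set.mem_ofList l x).mpr hx, rfl⟩
        exact findMaj_none n _ hfm _ this
      · rw [List.count_eq_zero_of_not_mem hx, hn]
        exact_mod_cast Nat.zero_le _
    simp only
    exact spec_neg n l [] (by simpa using hall)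
  · -- majority element m: B's second pass agrees with the reference
    obtain ⟨c, hc1, hc2⟩ := findMaj_some n _ m hfm
    rw [PySem.Dict.items_counter] at hc1
    obtain ⟨k, hk1, hk2⟩ := List.mem_map.mp hc1
    have hkm : k = m := (Prod.mk.injEq _ _ _ _ ▸ hk2).1
    have hcv : c = (l.count m : Int) := by
      have := (Prod.mk.injEq _ _ _ _ ▸ hk2).2
      rw [← this, hkm]
    have hm : (l.count m : Int) > n := hcv ▸ hc2
    have hlen : (l.length : Int) ≤ 2 * n + 1 := by
      rw [hn]; omega
    have hne : l ≠ [] := by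
      intro h; subst h
      have : m ∈ PySem.Set.ofList ([] : List Int) := hkm ▸ hk1
      simpa [PySem.Set.ofList] using this
    have h1n : (1:Int) ≤ n := by
      have hlp : 1 ≤ l.length := List.length_pos_iff.mpr hne
      have hl2 : 2 ≤ l.length := by
        rcases Nat.lt_or_ge l.length 2 with h | h
        · interval_cases h' : l.length <;> simp_all [D_f]
        · exact h
      rw [hn]
      have : 1 ≤ l.length / 2 := Nat.one_le_div_iff (by norm_num) |>.mpr hl2
      exact_mod_cast this
    simp only
    have := fscan_eq_spec n m l hm hlen h1n l [] rfl
    simpa using this.symm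

theorem f_changed : Claim_changed_f := by unfold Claim_changed_f; decide

theorem f_tight : Claim_exact_f := by
  intro l _ hD
  obtain ⟨x, hx⟩ : ∃ x, l = [x] := by
    cases l with
    | nil => simp [D_f] at hD
    | cons a t =>
      cases t with
      | nil => exact ⟨a, rfl⟩
      | cons b t => simp [D_f] at hD
  subst hx
  have hA : f [x] = -1 := by
    simp [f, f_go, PySem.List.enumerate, PySem.Dict.contains, PySem.Dict.empty]
  have hB : f_alt [x] = 0 := by
    simp [f_alt, f_countLoop, f_findMaj, f_scan, PySem.List.enumerate,
      PySem.Dict.empty, PySem.Dict.getD, PySem.Dict.get?, PySem.Dict.insert,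
      PySem.Int.floordiv]
  rw [hA, hB]; decide
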